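-- pv_equiv track=rewrite | github.com/GeorgeTegos/codeclan_weekend_homeworks | week_01_homework/advanced_logic_exercise.py | unlucky
-- ===== SOURCE A (Python) =====
-- def unlucky(list_name):
--     flag = False
--     total = 0
--     for number in list_name:
--         if number == 13:
--             flag = True
--         elif flag != True:
--             total = total + number
--     return total
-- ===== SOURCE B (Python) =====
-- def unlucky(list_name):
--     # Backwards traversal: reset the accumulator at each 13; what survives to the
--     # end is exactly the sum of the elements preceding the first 13.
--     total = 0
--     for number in reversed(list_name):
--         total = 0 if number == 13 else total + number
--     return total
-- ===== Notes on version B (the rewrite author's own statement) =====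
-- stated objective: alternative
-- what changed: Traverses the list in reverse with an accumulator that resets to 0 at every 13, instead of a forward pass with a boolean skip-flag: the reset wipes everything after any 13, leaving the sum of the prefix before the first 13.
import Mathlib
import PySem

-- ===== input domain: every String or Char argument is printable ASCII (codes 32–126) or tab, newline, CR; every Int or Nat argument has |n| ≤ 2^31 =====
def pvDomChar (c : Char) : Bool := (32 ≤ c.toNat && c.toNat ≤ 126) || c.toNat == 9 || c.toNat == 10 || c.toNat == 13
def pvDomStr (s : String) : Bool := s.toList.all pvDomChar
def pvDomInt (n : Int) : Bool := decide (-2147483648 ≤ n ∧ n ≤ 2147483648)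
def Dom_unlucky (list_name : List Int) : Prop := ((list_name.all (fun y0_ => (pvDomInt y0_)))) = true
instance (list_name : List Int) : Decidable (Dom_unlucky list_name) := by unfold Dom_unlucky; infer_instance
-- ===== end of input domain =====

-- ===== PORT A =====
-- B traverses the list in REVERSE with an accumulator reset to 0 at every 13 (alternative algorithm, same cost).
def unlucky (list_name : List Int) : Int :=
  (list_name.foldl (fun (st : Bool × Int) number =>
      if number == 13 then (true, st.2)
      else if st.1 != true then (st.1, st.2 + number)
      else st) (false, 0)).2

-- ===== PORT B =====
def unlucky_alt (list_name : List Int) : Int :=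
  list_name.reverse.foldl (fun total number => if number == 13 then 0 else total + number) 0

-- ===== PRECONDITION & SPEC =====
def Spec_unlucky (list_name : List Int) (out : Int) : Prop := out = unlucky_alt list_name
instance (list_name : List Int) (out : Int) : Decidable (Spec_unlucky list_name out) := by unfold Spec_unlucky; infer_instance

-- ===== CLAIM =====
def Claim_equal_unlucky : Prop := ∀ (list_name : List Int), Dom_unlucky list_name → Spec_unlucky list_name (unlucky list_name)

-- ===== LEMMAS AND PROOFS =====
-- once the flag is true, A's fold never changes total
lemma unlucky_flag_true (l : List Int) (t : Int) :
    (l.foldl (fun (st : Bool × Int) number =>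
      if number == 13 then (true, st.2)
      else if st.1 != true then (st.1, st.2 + number)
      else st) (true, t)) = (true, t) := by
  induction l generalizing t with
  | nil => rfl
  | cons x xs ih =>
    rw [List.foldl_cons]
    have hstep : (if (x == 13) = true then ((true : Bool), t)
        else if ((true : Bool) != true) = true then ((true : Bool), t + x)
        else ((true : Bool), t)) = ((true : Bool), t) := by
      by_cases h : x = 13 <;> simp [h]
    rw [hstep]; exact ih t

-- A's fold from a false flag computes t + sum of the prefix before the first 13
lemma unlucky_fold_false (l : List Int) (t : Int) :
    ((l.foldl (fun (st : Bool × Int) number =>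
      if number == 13 then (true, st.2)
      else if st.1 != true then (st.1, st.2 + number)
      else st) (false, t))).2 = t + (l.takeWhile (fun x => x != 13)).sum := by
  induction l generalizing t with
  | nil => simp
  | cons x xs ih =>
    rw [List.foldl_cons]
    by_cases h : x = 13
    · have hstep : (if (x == 13) = true then ((true : Bool), t)
          else if ((false : Bool) != true) = true then ((false : Bool), t + x)
          else ((false : Bool), t)) = ((true : Bool), t) := by simp [h]
      rw [hstep, unlucky_flag_true]; simp [h]
    · have hstep : (if (x == 13) = true then ((true : Bool), t)
          else if ((false : Bool) != true) = true then ((false : Bool), t + x)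
          else ((false : Bool), t)) = ((false : Bool), t + x) := by simp [h]
      rw [hstep, ih]; simp [h, add_assoc]

-- B's reverse fold also computes the sum of the prefix before the first 13
lemma unlucky_alt_eq_takeWhile (l : List Int) :
    unlucky_alt l = (l.takeWhile (fun x => x != 13)).sum := by
  unfold unlucky_alt
  rw [List.foldl_reverse]
  induction l with
  | nil => rfl
  | cons x xs ih =>
    rw [List.foldr_cons, ih]
    by_cases h : x = 13 <;> simp [h, add_comm]

-- ===== VERDICT =====
theorem unlucky_spec : Claim_equal_unlucky := by
  intro l _
  unfold Spec_unlucky unlucky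
  rw [unlucky_alt_eq_takeWhile]
  simpa using unlucky_fold_false l 0
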